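-- pv_equiv track=rewrite | github.com/techbow-homework/homework | src/main/java/com/techbow/homework/y2021/m10/nameless/googleVirusAndAnti.py | getAntiNumber
-- ===== SOURCE A (Python) =====
-- import collections
--
-- def getAntiNumber(edges, virus, anti):
--     graph = collections.defaultdict(set)
--     for u,v in edges:
--         graph[u].add(v)
--         graph[v].add(u)
--     queue = collections.deque()
--     queue.append(virus)
--     queue.append(anti)
--     virusNum = 1
--     antiNum = 1
--     nxtVirusNum = 0
--     nxtAntiNum = 0
--     visited = set()
--     visited.add(virus)
--     visited.add(anti)
--     res = 1
--     while queue: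
--         while virusNum:
--             virusNum-=1
--             cur = queue.popleft()
--             for nxt in graph[cur]:
--                 if nxt not in visited:
--                     visited.add(nxt)
--                     queue.append(nxt)
--                     nxtVirusNum+=1
--         virusNum = nxtVirusNum
--         nxtVirusNum=0
--         while antiNum:
--             antiNum-=1
--             cur = queue.popleft()
--             for nxt in graph[cur]:
--                 if nxt not in visited:
--                     visited.add(nxt)
--                     queue.append(nxt)
--                     nxtAntiNum+=1
--         antiNum = nxtAntiNum
--         nxtAntiNum= 0
--         res+=antiNum
--     return res
-- ===== SOURCE B (Python) =====
-- import collections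
--
-- def getAntiNumber(edges, virus, anti):
--     graph = collections.defaultdict(set)
--     for u, v in edges:
--         graph[u].add(v)
--         graph[v].add(u)
--
--     def bfs(src):
--         dist = {src: 0}
--         frontier = [src]
--         d = 0
--         while frontier:
--             d += 1
--             nxt_frontier = []
--             for cur in frontier:
--                 for nxt in graph[cur]:
--                     if nxt not in dist:
--                         dist[nxt] = d
--                         nxt_frontier.append(nxt)
--             frontier = nxt_frontier
--         return dist
--
--     dv = bfs(virus)
--     da = bfs(anti)
--     res = 1
--     for node, d in da.items():
--         if node != anti and (node not in dv or d < dv[node]):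
--             res += 1
--     return res
-- ===== Notes on version B (the rewrite author's own statement) =====
-- stated objective: alternative
-- what changed: Instead of simulating the competitive alternating spread with a shared visited set, B runs two independent single-source level-order BFS computing distance maps from virus and from anti, and returns 1 plus the number of nodes strictly closer to anti than to virus (ties and unreachable-from-anti nodes go to virus); this relies on the provable fact that with virus moving first each round, a node is anti-claimed iff d_anti < d_virus.
import Mathlib
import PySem

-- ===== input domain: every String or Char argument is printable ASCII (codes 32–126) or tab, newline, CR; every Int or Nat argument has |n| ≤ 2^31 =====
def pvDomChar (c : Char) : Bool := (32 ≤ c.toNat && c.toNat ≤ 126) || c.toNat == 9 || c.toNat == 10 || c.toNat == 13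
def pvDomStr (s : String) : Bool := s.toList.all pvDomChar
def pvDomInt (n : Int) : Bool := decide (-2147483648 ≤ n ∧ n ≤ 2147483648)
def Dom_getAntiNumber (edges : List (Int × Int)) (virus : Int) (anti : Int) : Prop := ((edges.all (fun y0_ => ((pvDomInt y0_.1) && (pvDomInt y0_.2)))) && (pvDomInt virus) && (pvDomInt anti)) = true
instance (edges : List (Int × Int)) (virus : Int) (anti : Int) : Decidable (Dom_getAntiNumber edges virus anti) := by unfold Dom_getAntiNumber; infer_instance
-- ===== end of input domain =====

-- B replaces A's competitive alternating spread (one shared deque, a shared visited set and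
-- four level counters) by a different algorithm: two INDEPENDENT single-source level-order BFS
-- computing distance maps from virus and from anti, then 1 + the count of nodes strictly closer
-- to anti than to virus (objective: alternative algorithm, same asymptotics; equality of the
-- returned Int is what is proved — Python iterates neighbour sets in hash order, both ports in
-- insertion order, and the returned value is independent of that order).

-- ===== PORT A =====
-- graph = defaultdict(set); for u,v in edges: graph[u].add(v); graph[v].add(u)  (shared by both Pythons verbatim)
def pvBuildGraph (edges : List (Int × Int)) : PySem.Dict Int (PySem.Set Int) :=
  edges.foldl (fun g uv =>
    let g1 := g.insert uv.1 (PySem.Set.add (g.getD uv.1 PySem.Set.empty) uv.2)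
    g1.insert uv.2 (PySem.Set.add (g1.getD uv.2 PySem.Set.empty) uv.1)) PySem.Dict.empty

-- A's inner body: for nxt in graph[cur]: if nxt not in visited: visited.add; queue.append; nxtNum += 1
def pvVisitA (g : PySem.Dict Int (PySem.Set Int)) (cur : Int)
    (st : List Int × PySem.Set Int × Nat) : List Int × PySem.Set Int × Nat :=
  (g.getD cur PySem.Set.empty).foldl
    (fun st nxt => if PySem.Set.contains st.2.1 nxt then st
                   else (st.1 ++ [nxt], PySem.Set.add st.2.1 nxt, st.2.2 + 1)) st

-- A's counted inner while-loop: pop `n` nodes off the front of the deque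
def pvInnerA (g : PySem.Dict Int (PySem.Set Int)) :
    Nat → List Int → PySem.Set Int → Nat → List Int × PySem.Set Int × Nat
  | 0, q, vis, c => (q, vis, c)
  | _ + 1, [], vis, c => ([], vis, c)   -- popleft on empty deque: unreachable in A (counters track the queue length)
  | n + 1, cur :: q, vis, c =>
      let st := pvVisitA g cur (q, vis, c)
      pvInnerA g n st.1 st.2.1 st.2.2

-- A's outer while-queue loop; fuel only makes the recursion structural (it never runs out:
-- each round pops ≥ 1 node and at most 2 + 2*|edges| nodes are ever enqueued)
def pvOuterA (g : PySem.Dict Int (PySem.Set Int)) :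
    Nat → List Int → Nat → Nat → PySem.Set Int → Int → Int
  | 0, _, _, _, _, res => res
  | f + 1, q, vn, an, vis, res =>
    if q.isEmpty then res
    else
      let s1 := pvInnerA g vn q vis 0
      let s2 := pvInnerA g an s1.1 s1.2.1 0
      pvOuterA g f s2.1 s1.2.2 s2.2.2 s2.2.1 (res + (s2.2.2 : Int))

def getAntiNumber (edges : List (Int × Int)) (virus : Int) (anti : Int) : Int :=
  let g := pvBuildGraph edges
  pvOuterA g (2 * edges.length + 3) [virus, anti] 1 1
    (PySem.Set.add (PySem.Set.add PySem.Set.empty virus) anti) 1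

-- ===== PORT B =====
-- B's inner body: for nxt in graph[cur]: if nxt not in dist: dist[nxt] = d; nxt_frontier.append(nxt)
def pvBfsVisit (g : PySem.Dict Int (PySem.Set Int)) (dp : Int)
    (st : PySem.Dict Int Int × List Int) (cur : Int) : PySem.Dict Int Int × List Int :=
  (g.getD cur PySem.Set.empty).foldl
    (fun st nxt => if st.1.contains nxt then st
                   else (st.1.insert nxt dp, st.2 ++ [nxt])) st

-- B's 'while frontier:' level loop; fuel only makes the recursion structural
-- (2|edges|+3 exceeds the number of BFS levels, so it never runs out)
def pvBfsLoop (g : PySem.Dict Int (PySem.Set Int)) :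
    Nat → PySem.Dict Int Int → List Int → Int → PySem.Dict Int Int
  | 0, dist, _, _ => dist
  | f + 1, dist, frontier, d =>
    if frontier.isEmpty then dist
    else
      let st := frontier.foldl (pvBfsVisit g (d + 1)) (dist, [])
      pvBfsLoop g f st.1 st.2 (d + 1)

-- bfs(src): dist = {src: 0}; frontier = [src]; d = 0; while frontier: ...
def pvBfs (g : PySem.Dict Int (PySem.Set Int)) (fuel : Nat) (src : Int) : PySem.Dict Int Int :=
  pvBfsLoop g fuel (PySem.Dict.empty.insert src 0) [src] 0

def getAntiNumber_alt (edges : List (Int × Int)) (virus : Int) (anti : Int) : Int :=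
  let g := pvBuildGraph edges
  let dv := pvBfs g (2 * edges.length + 3) virus
  let da := pvBfs g (2 * edges.length + 3) anti
  da.items.foldl (fun res nd =>
    if nd.1 ≠ anti ∧ (¬ dv.contains nd.1 = true ∨ nd.2 < dv.getD nd.1 0) then res + 1 else res) 1

-- ===== PRECONDITION & SPEC =====
def Spec_getAntiNumber (edges : List (Int × Int)) (virus : Int) (anti : Int) (out : Int) : Prop := out = getAntiNumber_alt edges virus anti
instance (edges : List (Int × Int)) (virus : Int) (anti : Int) (out : Int) : Decidable (Spec_getAntiNumber edges virus anti out) := by unfold Spec_getAntiNumber; infer_instance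

-- ===== CLAIM (what is proved, stated in full; the proofs are below) =====
def Claim_equal_getAntiNumber : Prop := ∀ (edges : List (Int × Int)) (virus : Int) (anti : Int), Dom_getAntiNumber edges virus anti → Spec_getAntiNumber edges virus anti (getAntiNumber edges virus anti)

-- ===== LEMMAS AND PROOFS =====

-- ---------- the competitive-frontier form of A (proof-side intermediate) ----------
def pvVisitC (g : PySem.Dict Int (PySem.Set Int))
    (st : List Int × PySem.Set Int) (cur : Int) : List Int × PySem.Set Int :=
  (g.getD cur PySem.Set.empty).foldl
    (fun st nxt => if PySem.Set.contains st.2 nxt then st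
                   else (st.1 ++ [nxt], PySem.Set.add st.2 nxt)) st

def pvExpandC (g : PySem.Dict Int (PySem.Set Int)) (front : List Int)
    (vis : PySem.Set Int) : List Int × PySem.Set Int :=
  front.foldl (pvVisitC g) ([], vis)

def pvCompStop (g : PySem.Dict Int (PySem.Set Int)) :
    Nat → List Int → List Int → PySem.Set Int → Int → Int
  | 0, _, _, _, res => res
  | f + 1, vf, af, vis, res =>
    if vf.isEmpty && af.isEmpty then res
    else
      let p1 := pvExpandC g vf vis
      let p2 := pvExpandC g af p1.2
      pvCompStop g f p1.1 p2.1 p2.2 (res + (p2.1.length : Int))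

-- accumulator shift for C's neighbour fold
theorem pvVisitC_shift (ns : List Int) :
    ∀ (acc : List Int) (vis : PySem.Set Int),
      ns.foldl (fun st nxt => if PySem.Set.contains st.2 nxt then st
                   else (st.1 ++ [nxt], PySem.Set.add st.2 nxt)) (acc, vis)
      = (acc ++ (ns.foldl (fun st nxt => if PySem.Set.contains st.2 nxt then st
                   else (st.1 ++ [nxt], PySem.Set.add st.2 nxt)) ([], vis)).1,
         (ns.foldl (fun st nxt => if PySem.Set.contains st.2 nxt then st
                   else (st.1 ++ [nxt], PySem.Set.add st.2 nxt)) ([], vis)).2) := by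
  induction ns with
  | nil => simp
  | cons n ns ih =>
    intro acc vis
    simp only [List.foldl_cons]
    by_cases h : PySem.Set.contains vis n = true
    · rw [if_pos h, if_pos h]; exact ih acc vis
    · rw [if_neg h, if_neg h]
      simp only [List.nil_append]
      rw [ih (acc ++ [n]) (PySem.Set.add vis n), ih [n] (PySem.Set.add vis n)]
      simp [List.append_assoc]

theorem pvVisitC_acc (g : PySem.Dict Int (PySem.Set Int)) (cur : Int)
    (acc : List Int) (vis : PySem.Set Int) :
    pvVisitC g (acc, vis) cur
      = (acc ++ (pvVisitC g ([], vis) cur).1, (pvVisitC g ([], vis) cur).2) := by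
  unfold pvVisitC
  exact pvVisitC_shift _ acc vis

-- A's per-node neighbour fold equals C's, through the queue-append + counter view
theorem pvVisitA_eq (g : PySem.Dict Int (PySem.Set Int)) (cur : Int)
    (q : List Int) (vis : PySem.Set Int) (c : Nat) :
    pvVisitA g cur (q, vis, c)
      = (q ++ (pvVisitC g ([], vis) cur).1, (pvVisitC g ([], vis) cur).2,
         c + (pvVisitC g ([], vis) cur).1.length) := by
  unfold pvVisitA pvVisitC
  generalize (g.getD cur PySem.Set.empty : List Int) = ns
  induction ns generalizing q vis c with
  | nil => simp
  | cons n ns ih =>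
    simp only [List.foldl_cons]
    by_cases h : PySem.Set.contains vis n = true
    · rw [if_pos h, if_pos h]; exact ih q vis c
    · rw [if_neg h, if_neg h]
      simp only [List.nil_append]
      rw [ih (q ++ [n]) (PySem.Set.add vis n) (c + 1),
          pvVisitC_shift ns [n] (PySem.Set.add vis n)]
      simp [List.append_assoc]
      omega

-- accumulator shift for a whole frontier
theorem pvExpandC_acc (g : PySem.Dict Int (PySem.Set Int)) (vf : List Int) :
    ∀ (acc : List Int) (vis : PySem.Set Int),
      vf.foldl (pvVisitC g) (acc, vis)
        = (acc ++ (pvExpandC g vf vis).1, (pvExpandC g vf vis).2) := by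
  induction vf with
  | nil => simp [pvExpandC]
  | cons cur vf ih =>
    intro acc vis
    simp only [pvExpandC, List.foldl_cons]
    rw [pvVisitC_acc g cur acc vis]
    rcases h : pvVisitC g ([], vis) cur with ⟨a, vis1⟩
    dsimp only
    rw [ih (acc ++ a) vis1, ih a vis1]
    simp [List.append_assoc]

-- A's counted inner loop on the deque vf ++ rest equals C's expansion of the frontier vf
theorem pvInnerA_eq (g : PySem.Dict Int (PySem.Set Int)) (vf : List Int) :
    ∀ (rest : List Int) (vis : PySem.Set Int) (c : Nat),
      pvInnerA g vf.length (vf ++ rest) vis c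
        = (rest ++ (pvExpandC g vf vis).1, (pvExpandC g vf vis).2,
           c + (pvExpandC g vf vis).1.length) := by
  induction vf with
  | nil => intro rest vis c; simp [pvInnerA, pvExpandC]
  | cons cur vf ih =>
    intro rest vis c
    simp only [List.length_cons, List.cons_append, pvInnerA]
    rw [pvVisitA_eq g cur (vf ++ rest) vis c]
    rcases h : pvVisitC g ([], vis) cur with ⟨a, vis1⟩
    dsimp only
    simp only [List.append_assoc]
    rw [ih (rest ++ a) vis1 (c + a.length)]
    have hexp : pvExpandC g (cur :: vf) vis
        = (a ++ (pvExpandC g vf vis1).1, (pvExpandC g vf vis1).2) := by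
      simp only [pvExpandC, List.foldl_cons]
      rw [show pvVisitC g ([], vis) cur = (a, vis1) from h]
      exact pvExpandC_acc g vf a vis1
    rw [hexp]
    simp [List.append_assoc, Nat.add_assoc]

-- the loop invariant: A's deque is the two competitive frontiers concatenated, A's counters their lengths
theorem pvOuter_eq (g : PySem.Dict Int (PySem.Set Int)) (f : Nat) :
    ∀ (vf af : List Int) (vis : PySem.Set Int) (res : Int),
      pvOuterA g f (vf ++ af) vf.length af.length vis res = pvCompStop g f vf af vis res := by
  induction f with
  | zero => intro vf af vis res; rfl
  | succ f ih =>
    intro vf af vis res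
    simp only [pvOuterA, pvCompStop]
    rw [show ((vf ++ af).isEmpty) = (vf.isEmpty && af.isEmpty) from by cases vf <;> simp]
    by_cases hb : (vf.isEmpty && af.isEmpty) = true
    · rw [if_pos hb, if_pos hb]
    · rw [if_neg hb, if_neg hb]
      rw [pvInnerA_eq g vf af vis 0]
      rcases h1 : pvExpandC g vf vis with ⟨nv, vis1⟩
      dsimp only
      simp only [Nat.zero_add]
      rw [pvInnerA_eq g af nv vis1 0]
      rcases h2 : pvExpandC g af vis1 with ⟨na, vis2⟩
      dsimp only
      simp only [Nat.zero_add]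
      exact ih nv na vis2 (res + (na.length : Int))

theorem getAntiNumber_eq_comp (edges : List (Int × Int)) (virus anti : Int) :
    getAntiNumber edges virus anti
      = pvCompStop (pvBuildGraph edges) (2 * edges.length + 3) [virus] [anti]
          (PySem.Set.add (PySem.Set.add PySem.Set.empty virus) anti) 1 := by
  show pvOuterA _ _ ([virus] ++ [anti]) [virus].length [anti].length _ 1 = _
  exact pvOuter_eq (pvBuildGraph edges) (2 * edges.length + 3) [virus] [anti] _ 1

-- ---------- iterated round-by-round views of both programs ----------
def pvCompStep (g : PySem.Dict Int (PySem.Set Int))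
    (s : List Int × List Int × PySem.Set Int × Int) : List Int × List Int × PySem.Set Int × Int :=
  (( pvExpandC g s.1 s.2.2.1).1,
   ( pvExpandC g s.2.1 (pvExpandC g s.1 s.2.2.1).2).1,
   ( pvExpandC g s.2.1 (pvExpandC g s.1 s.2.2.1).2).2,
   s.2.2.2 + (((pvExpandC g s.2.1 (pvExpandC g s.1 s.2.2.1).2).1.length : Int)))

def pvCompIter (g : PySem.Dict Int (PySem.Set Int))
    (s : List Int × List Int × PySem.Set Int × Int) : Nat → List Int × List Int × PySem.Set Int × Int
  | 0 => s
  | t + 1 => pvCompStep g (pvCompIter g s t)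

def pvBfsIter (g : PySem.Dict Int (PySem.Set Int)) (src : Int) : Nat → PySem.Dict Int Int × List Int
  | 0 => (PySem.Dict.empty.insert src 0, [src])
  | t + 1 => (pvBfsIter g src t).2.foldl (pvBfsVisit g ((t : Int) + 1)) ((pvBfsIter g src t).1, [])

theorem pvCompStep_nil (g : PySem.Dict Int (PySem.Set Int)) (vis : PySem.Set Int) (res : Int) :
    pvCompStep g ([], [], vis, res) = ([], [], vis, res) := by
  simp [pvCompStep, pvExpandC]

theorem pvCompIter_nil (g : PySem.Dict Int (PySem.Set Int)) (vis : PySem.Set Int) (res : Int) :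
    ∀ t, pvCompIter g ([], [], vis, res) t = ([], [], vis, res) := by
  intro t
  induction t with
  | zero => rfl
  | succ t ih => simp only [pvCompIter, ih, pvCompStep_nil]

theorem pvCompIter_step_comm (g : PySem.Dict Int (PySem.Set Int))
    (s : List Int × List Int × PySem.Set Int × Int) :
    ∀ f, pvCompIter g (pvCompStep g s) f = pvCompStep g (pvCompIter g s f) := by
  intro f
  induction f with
  | zero => rfl
  | succ f ih => simp only [pvCompIter, ih]

theorem pvCompStop_eq_iter (g : PySem.Dict Int (PySem.Set Int)) :
    ∀ (f : Nat) (vf af : List Int) (vis : PySem.Set Int) (res : Int),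
      pvCompStop g f vf af vis res = (pvCompIter g (vf, af, vis, res) f).2.2.2 := by
  intro f
  induction f with
  | zero => intro vf af vis res; rfl
  | succ f ih =>
    intro vf af vis res
    simp only [pvCompStop]
    by_cases hb : (vf.isEmpty && af.isEmpty) = true
    · rw [if_pos hb]
      obtain ⟨h1, h2⟩ := Bool.and_eq_true_iff.mp hb
      rw [List.isEmpty_iff.mp h1, List.isEmpty_iff.mp h2, pvCompIter_nil]
    · rw [if_neg hb]
      rw [ih]
      simp only [pvCompIter, ← pvCompIter_step_comm]
      rfl

theorem pvBfsIter_stable (g : PySem.Dict Int (PySem.Set Int)) (src : Int) (t : Nat)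
    (h : (pvBfsIter g src t).2 = []) :
    ∀ k, pvBfsIter g src (t + k) = pvBfsIter g src t := by
  intro k
  induction k with
  | zero => rfl
  | succ k ih =>
    show pvBfsIter g src ((t + k) + 1) = _
    simp only [pvBfsIter, ih, h]
    simp only [List.foldl_nil]
    conv_rhs => rw [← Prod.mk.eta (p := pvBfsIter g src t)]
    rw [h]

theorem pvBfsLoop_eq_iter (g : PySem.Dict Int (PySem.Set Int)) (src : Int) :
    ∀ (f t : Nat),
      pvBfsLoop g f (pvBfsIter g src t).1 (pvBfsIter g src t).2 (t : Int)
        = (pvBfsIter g src (t + f)).1 := by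
  intro f
  induction f with
  | zero => intro t; rfl
  | succ f ih =>
    intro t
    simp only [pvBfsLoop]
    by_cases he : (pvBfsIter g src t).2.isEmpty = true
    · rw [if_pos he, pvBfsIter_stable g src t (List.isEmpty_iff.mp he)]
    · rw [if_neg he]
      have : ((pvBfsIter g src t).2.foldl (pvBfsVisit g ((t : Int) + 1)) ((pvBfsIter g src t).1, []))
          = pvBfsIter g src (t + 1) := rfl
      rw [this]
      have hc : ((t : Int) + 1) = ((t + 1 : Nat) : Int) := by push_cast; ring
      rw [hc, ih (t + 1)]
      congr 2
      omega

theorem pvBfs_eq_iter (g : PySem.Dict Int (PySem.Set Int)) (fuel : Nat) (src : Int) :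
    pvBfs g fuel src = (pvBfsIter g src fuel).1 := by
  have := pvBfsLoop_eq_iter g src fuel 0
  simpa [pvBfs, pvBfsIter] using this

-- ---------- characterizing one round of frontier expansion ----------
def pvNbrs (g : PySem.Dict Int (PySem.Set Int)) (c : Int) : List Int :=
  (g.getD c PySem.Set.empty : PySem.Set Int)

def pvNx (g : PySem.Dict Int (PySem.Set Int)) (fr : List Int) (x : Int) : Prop :=
  ∃ c ∈ fr, x ∈ pvNbrs g c

theorem pvNx_nil (g : PySem.Dict Int (PySem.Set Int)) (x : Int) : ¬ pvNx g [] x := by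
  rintro ⟨c, hc, -⟩; exact absurd hc (List.not_mem_nil)

theorem pvNx_cons (g : PySem.Dict Int (PySem.Set Int)) (c : Int) (fr : List Int) (x : Int) :
    pvNx g (c :: fr) x ↔ x ∈ pvNbrs g c ∨ pvNx g fr x := by
  simp [pvNx, List.mem_cons, or_and_right, exists_or]

theorem pvNx_mono (g : PySem.Dict Int (PySem.Set Int)) {fr fr' : List Int}
    (h : ∀ x ∈ fr, x ∈ fr') {x : Int} : pvNx g fr x → pvNx g fr' x := by
  rintro ⟨c, hc, hx⟩; exact ⟨c, h c hc, hx⟩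

-- result of the visited-set expansion (A's competitive side)
structure PvCRes (fr : List Int) (vis : PySem.Set Int) (P : Int → Prop)
    (r : List Int × PySem.Set Int) : Prop where
  vmem : ∀ x : Int, x ∈ r.2 ↔ x ∈ vis ∨ P x
  mem : ∀ x : Int, x ∈ r.1 ↔ x ∈ fr ∨ (P x ∧ x ∉ vis)
  nodup : r.1.Nodup
  sub : ∀ x ∈ r.1, x ∈ r.2

theorem PvCRes.mono {fr : List Int} {vis : PySem.Set Int} {P Q : Int → Prop}
    {r : List Int × PySem.Set Int} (hPQ : ∀ x, P x ↔ Q x) (h : PvCRes fr vis P r) :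
    PvCRes fr vis Q r where
  vmem x := by rw [h.vmem x, hPQ x]
  mem x := by rw [h.mem x, hPQ x]
  nodup := h.nodup
  sub := h.sub

theorem PvCRes.comp {fr : List Int} {vis : PySem.Set Int} {P1 P2 : Int → Prop}
    {r1 r2 : List Int × PySem.Set Int}
    (h1 : PvCRes fr vis P1 r1) (h2 : PvCRes r1.1 r1.2 P2 r2) :
    PvCRes fr vis (fun x => P1 x ∨ P2 x) r2 where
  vmem x := by rw [h2.vmem x, h1.vmem x]; tauto
  mem x := by rw [h2.mem x, h1.mem x, h1.vmem x]; tauto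
  nodup := h2.nodup
  sub := h2.sub

theorem pvCInner (ns : List Int) :
    ∀ (fr : List Int) (vis : PySem.Set Int), fr.Nodup → (∀ x ∈ fr, x ∈ vis) →
      PvCRes fr vis (· ∈ ns)
        (ns.foldl (fun st nxt => if PySem.Set.contains st.2 nxt then st
                   else (st.1 ++ [nxt], PySem.Set.add st.2 nxt)) (fr, vis)) := by
  induction ns with
  | nil =>
    intro fr vis hnd hsub
    exact ⟨fun x => by simp, fun x => by simp, hnd, hsub⟩
  | cons n ns ih =>
    intro fr vis hnd hsub
    simp only [List.foldl_cons]
    by_cases hc : PySem.Set.contains vis n = true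
    · rw [if_pos hc]
      have hn : n ∈ vis := (PySem.Set.contains_iff vis n).mp hc
      have h := ih fr vis hnd hsub
      refine ⟨fun x => ?_, fun x => ?_, h.nodup, h.sub⟩
      · rw [h.vmem x]; simp only [List.mem_cons]
        constructor
        · tauto
        · rintro (hx | rfl | hx) <;> tauto
      · rw [h.mem x]; simp only [List.mem_cons]
        constructor
        · tauto
        · rintro (hx | ⟨(rfl | hx), hv⟩) <;> tauto
    · rw [if_neg hc]
      have hn : n ∉ vis := fun h => hc ((PySem.Set.contains_iff vis n).mpr h)
      have hnfr : n ∉ fr := fun h => hn (hsub n h)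
      rw [PySem.Set.add_of_not_mem hn]
      have hdisj : fr.Disjoint [n] := by
        intro a ha hb
        simp only [List.mem_singleton] at hb
        exact hnfr (hb ▸ ha)
      have hnd' : (fr ++ [n]).Nodup := List.Nodup.append hnd (List.nodup_singleton n) hdisj
      have hsub' : ∀ x ∈ fr ++ [n], x ∈ vis ++ [n] := by
        intro x hx
        rcases List.mem_append.mp hx with hx | hx
        · exact List.mem_append.mpr (Or.inl (hsub x hx))
        · exact List.mem_append.mpr (Or.inr hx)
      have h := ih (fr ++ [n]) (vis ++ [n]) hnd' hsub'
      refine ⟨fun x => ?_, fun x => ?_, h.nodup, h.sub⟩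
      · rw [h.vmem x]
        simp only [List.mem_append, List.mem_cons]
        tauto
      · rw [h.mem x]
        simp only [List.mem_append, List.mem_cons]
        by_cases hx : x = n
        · subst hx; tauto
        · tauto

theorem pvCFold (g : PySem.Dict Int (PySem.Set Int)) (front : List Int) :
    ∀ (fr : List Int) (vis : PySem.Set Int), fr.Nodup → (∀ x ∈ fr, x ∈ vis) →
      PvCRes fr vis (pvNx g front) (front.foldl (pvVisitC g) (fr, vis)) := by
  induction front with
  | nil =>
    intro fr vis hnd hsub
    exact ⟨fun x => by simp [pvNx_nil], fun x => by simp [pvNx_nil], hnd, hsub⟩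
  | cons c front ih =>
    intro fr vis hnd hsub
    simp only [List.foldl_cons]
    have hin : PvCRes fr vis (· ∈ pvNbrs g c) (pvVisitC g (fr, vis) c) :=
      pvCInner (pvNbrs g c) fr vis hnd hsub
    have hrec := ih (pvVisitC g (fr, vis) c).1 (pvVisitC g (fr, vis) c).2 hin.nodup hin.sub
    rw [Prod.mk.eta] at hrec
    exact (hin.comp hrec).mono (fun x => (pvNx_cons g c front x).symm)

theorem pvExpandC_char (g : PySem.Dict Int (PySem.Set Int)) (front : List Int)
    (vis : PySem.Set Int) : PvCRes [] vis (pvNx g front) (pvExpandC g front vis) :=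
  pvCFold g front [] vis List.nodup_nil (by intro x hx; exact absurd hx List.not_mem_nil)

-- result of the distance-dict expansion (B's BFS side)
structure PvDRes (dp : Int) (dist : PySem.Dict Int Int) (fr : List Int) (P : Int → Prop)
    (r : PySem.Dict Int Int × List Int) : Prop where
  con : ∀ x : Int, r.1.contains x = true ↔ dist.contains x = true ∨ P x
  old : ∀ x : Int, dist.contains x = true → r.1.get? x = dist.get? x
  mem : ∀ x : Int, x ∈ r.2 ↔ x ∈ fr ∨ (P x ∧ ¬ dist.contains x = true)
  nodup : r.2.Nodup
  sub : ∀ x ∈ r.2, r.1.contains x = true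
  knodup : r.1.keys.Nodup
  new : ∃ nw, r.2 = fr ++ nw ∧ r.1.items = dist.items ++ nw.map (fun x => (x, dp))

theorem PvDRes.mono {dp : Int} {dist : PySem.Dict Int Int} {fr : List Int} {P Q : Int → Prop}
    {r : PySem.Dict Int Int × List Int} (hPQ : ∀ x, P x ↔ Q x) (h : PvDRes dp dist fr P r) :
    PvDRes dp dist fr Q r where
  con x := by rw [h.con x, hPQ x]
  old := h.old
  mem x := by rw [h.mem x, hPQ x]
  nodup := h.nodup
  sub := h.sub
  knodup := h.knodup
  new := h.new

theorem PvDRes.comp {dp : Int} {dist : PySem.Dict Int Int} {fr : List Int} {P1 P2 : Int → Prop}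
    {r1 r2 : PySem.Dict Int Int × List Int}
    (h1 : PvDRes dp dist fr P1 r1) (h2 : PvDRes dp r1.1 r1.2 P2 r2) :
    PvDRes dp dist fr (fun x => P1 x ∨ P2 x) r2 where
  con x := by rw [h2.con x, h1.con x]; tauto
  old x hx := by rw [h2.old x ((h1.con x).mpr (Or.inl hx)), h1.old x hx]
  mem x := by rw [h2.mem x, h1.mem x, h1.con x]; tauto
  nodup := h2.nodup
  sub := h2.sub
  knodup := h2.knodup
  new := by
    obtain ⟨nw1, e1, e2⟩ := h1.new
    obtain ⟨nw2, e3, e4⟩ := h2.new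
    exact ⟨nw1 ++ nw2, by rw [e3, e1, List.append_assoc],
      by rw [e4, e2, List.map_append, List.append_assoc]⟩

theorem pvDInner (dp : Int) (ns : List Int) :
    ∀ (dist : PySem.Dict Int Int) (fr : List Int), fr.Nodup →
      (∀ x ∈ fr, dist.contains x = true) → dist.keys.Nodup →
      PvDRes dp dist fr (· ∈ ns)
        (ns.foldl (fun st nxt => if st.1.contains nxt then st
                   else (st.1.insert nxt dp, st.2 ++ [nxt])) (dist, fr)) := by
  induction ns with
  | nil =>
    intro dist fr hnd hsub hk
    exact ⟨fun x => by simp, fun x _ => rfl, fun x => by simp, hnd, hsub, hk, ⟨[], by simp⟩⟩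
  | cons n ns ih =>
    intro dist fr hnd hsub hk
    simp only [List.foldl_cons]
    by_cases hc : dist.contains n = true
    · rw [if_pos hc]
      have h := ih dist fr hnd hsub hk
      refine ⟨fun x => ?_, h.old, fun x => ?_, h.nodup, h.sub, h.knodup, h.new⟩
      · rw [h.con x]; simp only [List.mem_cons]
        constructor
        · tauto
        · rintro (hx | rfl | hx) <;> tauto
      · rw [h.mem x]; simp only [List.mem_cons]
        constructor
        · tauto
        · rintro (hx | ⟨(rfl | hx), hv⟩) <;> tauto
    · rw [if_neg hc]
      have hnfr : n ∉ fr := fun h => hc (hsub n h)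
      have hdisj : fr.Disjoint [n] := by
        intro a ha hb
        simp only [List.mem_singleton] at hb
        exact hnfr (hb ▸ ha)
      have hnd' : (fr ++ [n]).Nodup := List.Nodup.append hnd (List.nodup_singleton n) hdisj
      have hsub' : ∀ x ∈ fr ++ [n], (dist.insert n dp).contains x = true := by
        intro x hx
        rcases List.mem_append.mp hx with hx | hx
        · rw [PySem.Dict.contains_insert]
          simp [hsub x hx]
        · simp only [List.mem_singleton] at hx
          exact hx ▸ PySem.Dict.contains_insert_self dist n dp
      have hk' : (dist.insert n dp).keys.Nodup := PySem.Dict.nodup_keys_insert dist n dp hk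
      have h := ih (dist.insert n dp) (fr ++ [n]) hnd' hsub' hk'
      refine ⟨fun x => ?_, fun x hx => ?_, fun x => ?_, h.nodup, h.sub, h.knodup, ?_⟩
      · rw [h.con x, PySem.Dict.contains_insert]
        simp only [List.mem_cons, Bool.or_eq_true, beq_iff_eq]
        tauto
      · have hne : x ≠ n := fun he => hc (he ▸ hx)
        rw [h.old x (by rw [PySem.Dict.contains_insert]; simp [hx]),
            PySem.Dict.get?_insert_of_ne dist dp hne]
      · rw [h.mem x, PySem.Dict.contains_insert]
        simp only [List.mem_append, List.mem_cons, Bool.or_eq_true, beq_iff_eq]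
        by_cases hx : x = n
        · subst hx; tauto
        · tauto
      · obtain ⟨nw, e1, e2⟩ := h.new
        refine ⟨n :: nw, by rw [e1, List.append_assoc]; rfl, ?_⟩
        rw [e2, PySem.Dict.items_insert_of_not_contains dist dp (by simpa using hc)]
        simp

theorem pvDFold (g : PySem.Dict Int (PySem.Set Int)) (dp : Int) (front : List Int) :
    ∀ (dist : PySem.Dict Int Int) (fr : List Int), fr.Nodup →
      (∀ x ∈ fr, dist.contains x = true) → dist.keys.Nodup →
      PvDRes dp dist fr (pvNx g front) (front.foldl (pvBfsVisit g dp) (dist, fr)) := by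
  induction front with
  | nil =>
    intro dist fr hnd hsub hk
    exact ⟨fun x => by simp [pvNx_nil], fun x _ => rfl, fun x => by simp [pvNx_nil], hnd, hsub, hk,
      ⟨[], by simp⟩⟩
  | cons c front ih =>
    intro dist fr hnd hsub hk
    simp only [List.foldl_cons]
    have hin : PvDRes dp dist fr (· ∈ pvNbrs g c) (pvBfsVisit g dp (dist, fr) c) :=
      pvDInner dp (pvNbrs g c) dist fr hnd hsub hk
    have hrec := ih (pvBfsVisit g dp (dist, fr) c).1 (pvBfsVisit g dp (dist, fr) c).2
      hin.nodup hin.sub hin.knodup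
    rw [Prod.mk.eta] at hrec
    exact (hin.comp hrec).mono (fun x => (pvNx_cons g c front x).symm)

-- a fresh frontier node's distance entry
theorem PvDRes.get_new {dp : Int} {dist : PySem.Dict Int Int} {P : Int → Prop}
    {r : PySem.Dict Int Int × List Int} (h : PvDRes dp dist [] P r) :
    ∀ x ∈ r.2, r.1.get? x = some dp := by
  intro x hx
  obtain ⟨nw, e1, e2⟩ := h.new
  rw [List.nil_append] at e1
  have hmem : (x, dp) ∈ r.1.items := by
    rw [e2]
    exact List.mem_append.mpr (Or.inr (List.mem_map.mpr ⟨x, e1 ▸ hx, rfl⟩))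
  exact PySem.Dict.get?_of_mem_items r.1 hmem h.knodup

-- ---------- the main invariant: competitive round t vs the two BFS level-t states ----------
def pvCondB (dv : PySem.Dict Int Int) (anti : Int) (nd : Int × Int) : Bool :=
  decide (nd.1 ≠ anti ∧ (¬ dv.contains nd.1 = true ∨ nd.2 < dv.getD nd.1 0))

structure PvInv (g : PySem.Dict Int (PySem.Set Int)) (anti : Int) (t : Nat)
    (vf af : List Int) (vis : PySem.Set Int) (res : Int)
    (Dv : PySem.Dict Int Int) (fv : List Int)
    (Da : PySem.Dict Int Int) (fa : List Int) : Prop where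
  i1 : ∀ x : Int, x ∈ vis ↔ (Dv.contains x = true ∨ Da.contains x = true)
  i2 : ∀ x : Int, x ∈ vf ↔ x ∈ fv ∧ ¬(Da.contains x = true ∧ x ∉ fa)
  i3 : ∀ x : Int, x ∈ af ↔ x ∈ fa ∧ (¬ Dv.contains x = true ∨ (t = 0 ∧ x = anti))
  i5v : ∀ p ∈ Dv.items, p.2 ≤ (t : Int)
  i5a : ∀ p ∈ Da.items, p.2 ≤ (t : Int)
  i6 : res = 1 + (Da.items.countP (pvCondB Dv anti) : Int)
  i7v : ∀ x : Int, Dv.contains x = true → x ∉ fv → ∀ y ∈ pvNbrs g x, Dv.contains y = true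
  i7a : ∀ x : Int, Da.contains x = true → x ∉ fa → ∀ y ∈ pvNbrs g x, Da.contains y = true
  i9 : Da.contains anti = true
  hkv : Dv.keys.Nodup
  hka : Da.keys.Nodup

theorem pvInv_base (g : PySem.Dict Int (PySem.Set Int)) (virus anti : Int) :
    PvInv g anti 0 [virus] [anti] (PySem.Set.add (PySem.Set.add PySem.Set.empty virus) anti) 1
      (PySem.Dict.empty.insert virus 0) [virus] (PySem.Dict.empty.insert anti 0) [anti] := by
  have hcv : ∀ x : Int, (PySem.Dict.empty.insert virus (0 : Int)).contains x = true ↔ x = virus := by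
    intro x
    rw [PySem.Dict.contains_insert]
    simp [PySem.Dict.contains_empty]
  have hca : ∀ x : Int, (PySem.Dict.empty.insert anti (0 : Int)).contains x = true ↔ x = anti := by
    intro x
    rw [PySem.Dict.contains_insert]
    simp [PySem.Dict.contains_empty]
  have hitv : (PySem.Dict.empty.insert virus (0 : Int)).items = [(virus, 0)] := by
    rw [PySem.Dict.items_insert_of_not_contains _ _ (PySem.Dict.contains_empty virus)]
    rfl
  have hita : (PySem.Dict.empty.insert anti (0 : Int)).items = [(anti, 0)] := by
    rw [PySem.Dict.items_insert_of_not_contains _ _ (PySem.Dict.contains_empty anti)]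
    rfl
  refine ⟨?_, ?_, ?_, ?_, ?_, ?_, ?_, ?_, ?_, ?_, ?_⟩
  · intro x
    rw [hcv x, hca x]
    simp only [PySem.Set.mem_add]
    simp only [PySem.Set.empty, List.not_mem_nil, false_or]
  · intro x
    rw [hca x]
    simp only [List.mem_singleton]
    tauto
  · intro x
    rw [hcv x]
    simp only [List.mem_singleton]
    tauto
  · intro p hp
    rw [hitv] at hp
    simp only [List.mem_singleton] at hp
    subst hp; simp
  · intro p hp
    rw [hita] at hp
    simp only [List.mem_singleton] at hp
    subst hp; simp
  · rw [hita]
    simp [pvCondB]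
  · intro x hx hnx
    rw [hcv x] at hx
    exact absurd (List.mem_singleton.mpr hx) hnx
  · intro x hx hnx
    rw [hca x] at hx
    exact absurd (List.mem_singleton.mpr hx) hnx
  · exact PySem.Dict.contains_insert_self _ anti 0
  · exact PySem.Dict.nodup_keys_insert _ virus 0 PySem.Dict.nodup_keys_empty
  · exact PySem.Dict.nodup_keys_insert _ anti 0 PySem.Dict.nodup_keys_empty

theorem pvInv_step (g : PySem.Dict Int (PySem.Set Int)) (anti : Int) (t : Nat)
    (vf af : List Int) (vis : PySem.Set Int) (res : Int)
    (Dv : PySem.Dict Int Int) (fv : List Int) (Da : PySem.Dict Int Int) (fa : List Int)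
    (h : PvInv g anti t vf af vis res Dv fv Da fa) :
    PvInv g anti (t + 1)
      (pvExpandC g vf vis).1
      (pvExpandC g af (pvExpandC g vf vis).2).1
      (pvExpandC g af (pvExpandC g vf vis).2).2
      (res + ((pvExpandC g af (pvExpandC g vf vis).2).1.length : Int))
      (fv.foldl (pvBfsVisit g ((t : Int) + 1)) (Dv, [])).1
      (fv.foldl (pvBfsVisit g ((t : Int) + 1)) (Dv, [])).2
      (fa.foldl (pvBfsVisit g ((t : Int) + 1)) (Da, [])).1
      (fa.foldl (pvBfsVisit g ((t : Int) + 1)) (Da, [])).2 := by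
  have Cv := pvExpandC_char g vf vis
  have Ca := pvExpandC_char g af (pvExpandC g vf vis).2
  have Bv := pvDFold g ((t : Int) + 1) fv Dv [] List.nodup_nil
    (by intro x hx; exact absurd hx List.not_mem_nil) h.hkv
  have Ba := pvDFold g ((t : Int) + 1) fa Da [] List.nodup_nil
    (by intro x hx; exact absurd hx List.not_mem_nil) h.hka
  -- membership views of the four expansion results
  have mvf : ∀ x : Int, x ∈ (pvExpandC g vf vis).1 ↔ pvNx g vf x ∧ x ∉ vis := by
    intro x; rw [Cv.mem x]; simp
  have mv1 := Cv.vmem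
  have maf : ∀ x : Int, x ∈ (pvExpandC g af (pvExpandC g vf vis).2).1
      ↔ pvNx g af x ∧ x ∉ (pvExpandC g vf vis).2 := by
    intro x; rw [Ca.mem x]; simp
  have mfv : ∀ x : Int, x ∈ (fv.foldl (pvBfsVisit g ((t : Int) + 1)) (Dv, [])).2
      ↔ pvNx g fv x ∧ ¬ Dv.contains x = true := by
    intro x; rw [Bv.mem x]; simp
  have mfa : ∀ x : Int, x ∈ (fa.foldl (pvBfsVisit g ((t : Int) + 1)) (Da, [])).2
      ↔ pvNx g fa x ∧ ¬ Da.contains x = true := by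
    intro x; rw [Ba.mem x]; simp
  have hvf_fv : ∀ x ∈ vf, x ∈ fv := fun x hx => ((h.i2 x).mp hx).1
  have haf_fa : ∀ x ∈ af, x ∈ fa := fun x hx => ((h.i3 x).mp hx).1
  -- key transfer lemmas between the competitive frontiers and the solo BFS layers
  have L1 : ∀ x : Int, pvNx g fv x → ¬ Da.contains x = true → pvNx g vf x := by
    rintro x ⟨m, hm, hxm⟩ hda
    by_cases hmv : m ∈ vf
    · exact ⟨m, hmv, hxm⟩
    · have hcon : Da.contains m = true ∧ m ∉ fa := by
        by_contra hc
        exact hmv ((h.i2 m).mpr ⟨hm, hc⟩)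
      exact absurd (h.i7a m hcon.1 hcon.2 x hxm) hda
  have L6 : ∀ x : Int, pvNx g fv x → x ∈ vis ∨ pvNx g vf x := by
    rintro x ⟨m, hm, hxm⟩
    by_cases hmv : m ∈ vf
    · exact Or.inr ⟨m, hmv, hxm⟩
    · have hcon : Da.contains m = true ∧ m ∉ fa := by
        by_contra hc
        exact hmv ((h.i2 m).mpr ⟨hm, hc⟩)
      exact Or.inl ((h.i1 x).mpr (Or.inr (h.i7a m hcon.1 hcon.2 x hxm)))
  have L2 : ∀ x : Int, pvNx g fa x → ¬ Dv.contains x = true → ¬ pvNx g fv x → pvNx g af x := by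
    rintro x ⟨m, hm, hxm⟩ hdv hnfv
    have hmaf : m ∈ af := by
      by_cases hdm : Dv.contains m = true
      · by_cases hmf : m ∈ fv
        · exact absurd ⟨m, hmf, hxm⟩ hnfv
        · exact absurd (h.i7v m hdm hmf x hxm) hdv
      · exact (h.i3 m).mpr ⟨hm, Or.inl hdm⟩
    exact ⟨m, hmaf, hxm⟩
  have L5 : ∀ x : Int, pvNx g fa x → x ∈ vis ∨ pvNx g vf x ∨ pvNx g af x := by
    rintro x ⟨m, hm, hxm⟩
    by_cases hmaf : m ∈ af
    · exact Or.inr (Or.inr ⟨m, hmaf, hxm⟩)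
    · have hdm : Dv.contains m = true := by
        by_contra hc
        exact hmaf ((h.i3 m).mpr ⟨hm, Or.inl hc⟩)
      by_cases hmf : m ∈ fv
      · have hmvf : m ∈ vf := (h.i2 m).mpr ⟨hmf, fun hcc => hcc.2 hm⟩
        exact Or.inr (Or.inl ⟨m, hmvf, hxm⟩)
      · exact Or.inl ((h.i1 x).mpr (Or.inl (h.i7v m hdm hmf x hxm)))
  -- i1 at t+1
  have i1' : ∀ x : Int, x ∈ (pvExpandC g af (pvExpandC g vf vis).2).2
      ↔ ((fv.foldl (pvBfsVisit g ((t : Int) + 1)) (Dv, [])).1.contains x = true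
         ∨ (fa.foldl (pvBfsVisit g ((t : Int) + 1)) (Da, [])).1.contains x = true) := by
    intro x
    rw [Ca.vmem x, Cv.vmem x, Bv.con x, Ba.con x]
    constructor
    · rintro ((hx | hx) | hx)
      · rcases (h.i1 x).mp hx with hx | hx
        · exact Or.inl (Or.inl hx)
        · exact Or.inr (Or.inl hx)
      · exact Or.inl (Or.inr (pvNx_mono g hvf_fv hx))
      · exact Or.inr (Or.inr (pvNx_mono g haf_fa hx))
    · rintro ((hx | hx) | (hx | hx))
      · exact Or.inl (Or.inl ((h.i1 x).mpr (Or.inl hx)))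
      · rcases L6 x hx with hx | hx
        · exact Or.inl (Or.inl hx)
        · exact Or.inl (Or.inr hx)
      · exact Or.inl (Or.inl ((h.i1 x).mpr (Or.inr hx)))
      · rcases L5 x hx with hx | hx | hx
        · exact Or.inl (Or.inl hx)
        · exact Or.inl (Or.inr hx)
        · exact Or.inr hx
  -- the anti frontier at t+1, as "level t+1 of anti's BFS, not reached by virus's BFS"
  have maf2 : ∀ x : Int, x ∈ (pvExpandC g af (pvExpandC g vf vis).2).1
      ↔ x ∈ (fa.foldl (pvBfsVisit g ((t : Int) + 1)) (Da, [])).2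
        ∧ ¬ (fv.foldl (pvBfsVisit g ((t : Int) + 1)) (Dv, [])).1.contains x = true := by
    intro x
    rw [maf x, mfa x, Bv.con x, Cv.vmem x]
    constructor
    · rintro ⟨hnx, hnv1⟩
      have hvis : x ∉ vis := fun hx => hnv1 (Or.inl hx)
      have hdv : ¬ Dv.contains x = true := fun hc => hvis ((h.i1 x).mpr (Or.inl hc))
      have hda : ¬ Da.contains x = true := fun hc => hvis ((h.i1 x).mpr (Or.inr hc))
      have hnfv : ¬ pvNx g fv x := by
        intro hf
        rcases L6 x hf with hx | hx
        · exact hvis hx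
        · exact hnv1 (Or.inr hx)
      exact ⟨⟨pvNx_mono g haf_fa hnx, hda⟩, fun hc => hc.elim hdv hnfv⟩
    · rintro ⟨⟨hfa, hda⟩, hdvf⟩
      have hdv : ¬ Dv.contains x = true := fun hc => hdvf (Or.inl hc)
      have hnfv : ¬ pvNx g fv x := fun hc => hdvf (Or.inr hc)
      refine ⟨L2 x hfa hdv hnfv, ?_⟩
      rintro (hx | hx)
      · rcases (h.i1 x).mp hx with hc | hc
        · exact hdv hc
        · exact hda hc
      · exact hnfv (pvNx_mono g hvf_fv hx)
  -- i5 at t+1 (both sides)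
  have i5v' : ∀ p ∈ (fv.foldl (pvBfsVisit g ((t : Int) + 1)) (Dv, [])).1.items,
      p.2 ≤ ((t + 1 : Nat) : Int) := by
    obtain ⟨nw, e1, e2⟩ := Bv.new
    intro p hp
    rw [e2] at hp
    rcases List.mem_append.mp hp with hp | hp
    · have := h.i5v p hp
      push_cast
      omega
    · rcases List.mem_map.mp hp with ⟨x, _, rfl⟩
      push_cast
      omega
  have i5a' : ∀ p ∈ (fa.foldl (pvBfsVisit g ((t : Int) + 1)) (Da, [])).1.items,
      p.2 ≤ ((t + 1 : Nat) : Int) := by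
    obtain ⟨nw, e1, e2⟩ := Ba.new
    intro p hp
    rw [e2] at hp
    rcases List.mem_append.mp hp with hp | hp
    · have := h.i5a p hp
      push_cast
      omega
    · rcases List.mem_map.mp hp with ⟨x, _, rfl⟩
      push_cast
      omega
  -- i6 at t+1
  have i6' : res + (((pvExpandC g af (pvExpandC g vf vis).2).1.length : Int))
      = 1 + (((fa.foldl (pvBfsVisit g ((t : Int) + 1)) (Da, [])).1.items.countP
          (pvCondB (fv.foldl (pvBfsVisit g ((t : Int) + 1)) (Dv, [])).1 anti) : Int)) := by
    obtain ⟨nwa, ea1, ea2⟩ := Ba.new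
    rw [List.nil_append] at ea1
    have hold : Da.items.countP (pvCondB (fv.foldl (pvBfsVisit g ((t : Int) + 1)) (Dv, [])).1 anti)
        = Da.items.countP (pvCondB Dv anti) := by
      apply List.countP_congr
      intro p hp
      simp only [pvCondB, decide_eq_true_eq]
      by_cases hc : Dv.contains p.1 = true
      · have hcc : (fv.foldl (pvBfsVisit g ((t : Int) + 1)) (Dv, [])).1.contains p.1 = true :=
          (Bv.con p.1).mpr (Or.inl hc)
        have hg : (fv.foldl (pvBfsVisit g ((t : Int) + 1)) (Dv, [])).1.getD p.1 0 = Dv.getD p.1 0 := by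
          rw [PySem.Dict.getD_eq_get?_getD, PySem.Dict.getD_eq_get?_getD, Bv.old p.1 hc]
        rw [hg, hcc, hc]
      · by_cases hcc : (fv.foldl (pvBfsVisit g ((t : Int) + 1)) (Dv, [])).1.contains p.1 = true
        · have hfv : p.1 ∈ (fv.foldl (pvBfsVisit g ((t : Int) + 1)) (Dv, [])).2 :=
            (mfv p.1).mpr ⟨((Bv.con p.1).mp hcc).resolve_left hc, hc⟩
          have hg : (fv.foldl (pvBfsVisit g ((t : Int) + 1)) (Dv, [])).1.get? p.1
              = some ((t : Int) + 1) := Bv.get_new p.1 hfv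
          have hgd : (fv.foldl (pvBfsVisit g ((t : Int) + 1)) (Dv, [])).1.getD p.1 0
              = (t : Int) + 1 := PySem.Dict.getD_of_get?_eq_some _ 0 hg
          have hle : p.2 ≤ (t : Int) := h.i5a p hp
          constructor
          · rintro ⟨h1, -⟩
            exact ⟨h1, Or.inl hc⟩
          · rintro ⟨h1, -⟩
            refine ⟨h1, Or.inr ?_⟩
            rw [hgd]
            omega
        · constructor
          · rintro ⟨h1, -⟩
            exact ⟨h1, Or.inl hc⟩
          · rintro ⟨h1, -⟩
            exact ⟨h1, Or.inl hcc⟩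
    have hnew : (nwa.map (fun x => (x, (t : Int) + 1))).countP
        (pvCondB (fv.foldl (pvBfsVisit g ((t : Int) + 1)) (Dv, [])).1 anti)
        = (pvExpandC g af (pvExpandC g vf vis).2).1.length := by
      rw [List.countP_map]
      have hcong : ∀ x ∈ nwa,
          ((pvCondB (fv.foldl (pvBfsVisit g ((t : Int) + 1)) (Dv, [])).1 anti)
            ∘ (fun x => (x, (t : Int) + 1))) x = true
          ↔ (decide (¬ (fv.foldl (pvBfsVisit g ((t : Int) + 1)) (Dv, [])).1.contains x = true)) = true := by
        intro x hx
        have hxfa : x ∈ (fa.foldl (pvBfsVisit g ((t : Int) + 1)) (Da, [])).2 := by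
          rw [ea1]; exact hx
        have hda : ¬ Da.contains x = true := ((mfa x).mp hxfa).2
        have hne : x ≠ anti := fun he => hda (he ▸ h.i9)
        simp only [Function.comp, pvCondB, decide_eq_true_eq]
        constructor
        · rintro ⟨-, (hcon | hlt)⟩
          · exact hcon
          · intro hcc
            have hsome : ((fv.foldl (pvBfsVisit g ((t : Int) + 1)) (Dv, [])).1.get? x).isSome := by
              rw [← PySem.Dict.contains_eq_isSome_get?]
              exact hcc
            obtain ⟨v, hv⟩ := Option.isSome_iff_exists.mp hsome
            have hmemit : (x, v) ∈ (fv.foldl (pvBfsVisit g ((t : Int) + 1)) (Dv, [])).1.items :=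
              PySem.Dict.mem_items_of_get?_eq_some _ hv
            have hb := i5v' (x, v) hmemit
            have hgd : (fv.foldl (pvBfsVisit g ((t : Int) + 1)) (Dv, [])).1.getD x 0 = v :=
              PySem.Dict.getD_of_get?_eq_some _ 0 hv
            rw [hgd] at hlt
            simp only at hb
            push_cast at hb
            omega
        · intro hcon
          exact ⟨hne, Or.inl hcon⟩
      rw [List.countP_congr hcong, List.countP_eq_length_filter]
      apply List.Perm.length_eq
      rw [List.perm_ext_iff_of_nodup (List.Nodup.filter _ (ea1 ▸ Ba.nodup)) Ca.nodup]
      intro a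
      rw [List.mem_filter]
      simp only [decide_eq_true_eq]
      constructor
      · rintro ⟨ha, hnc⟩
        exact (maf2 a).mpr ⟨by rw [ea1]; exact ha, hnc⟩
      · intro ha
        obtain ⟨h1, h2⟩ := (maf2 a).mp ha
        refine ⟨?_, h2⟩
        rw [← ea1]
        exact h1
    rw [ea2, List.countP_append, hold, hnew, h.i6]
    push_cast
    ring
  -- i2 at t+1
  have i2' : ∀ x : Int, x ∈ (pvExpandC g vf vis).1
      ↔ x ∈ (fv.foldl (pvBfsVisit g ((t : Int) + 1)) (Dv, [])).2
        ∧ ¬((fa.foldl (pvBfsVisit g ((t : Int) + 1)) (Da, [])).1.contains x = true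
            ∧ x ∉ (fa.foldl (pvBfsVisit g ((t : Int) + 1)) (Da, [])).2) := by
    intro x
    constructor
    · intro hx
      obtain ⟨hnx, hnv⟩ := (mvf x).mp hx
      have hdv : ¬ Dv.contains x = true := fun hc => hnv ((h.i1 x).mpr (Or.inl hc))
      have hda : ¬ Da.contains x = true := fun hc => hnv ((h.i1 x).mpr (Or.inr hc))
      refine ⟨(mfv x).mpr ⟨pvNx_mono g hvf_fv hnx, hdv⟩, ?_⟩
      rintro ⟨hcon, hnfa⟩
      rcases (Ba.con x).mp hcon with hc | hc
      · exact hda hc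
      · exact hnfa ((mfa x).mpr ⟨hc, hda⟩)
    · rintro ⟨hx, hn⟩
      obtain ⟨hnx, hdv⟩ := (mfv x).mp hx
      have hda : ¬ Da.contains x = true := by
        intro hc
        exact hn ⟨(Ba.con x).mpr (Or.inl hc), fun hm => ((mfa x).mp hm).2 hc⟩
      refine (mvf x).mpr ⟨L1 x hnx hda, ?_⟩
      intro hv
      rcases (h.i1 x).mp hv with hc | hc
      · exact hdv hc
      · exact hda hc
  -- i3 at t+1
  have i3' : ∀ x : Int, x ∈ (pvExpandC g af (pvExpandC g vf vis).2).1
      ↔ x ∈ (fa.foldl (pvBfsVisit g ((t : Int) + 1)) (Da, [])).2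
        ∧ (¬ (fv.foldl (pvBfsVisit g ((t : Int) + 1)) (Dv, [])).1.contains x = true
           ∨ (t + 1 = 0 ∧ x = anti)) := by
    intro x
    rw [maf2 x]
    simp
  -- i7 at t+1 (both sides)
  have i7v' : ∀ x : Int, (fv.foldl (pvBfsVisit g ((t : Int) + 1)) (Dv, [])).1.contains x = true
      → x ∉ (fv.foldl (pvBfsVisit g ((t : Int) + 1)) (Dv, [])).2
      → ∀ y ∈ pvNbrs g x, (fv.foldl (pvBfsVisit g ((t : Int) + 1)) (Dv, [])).1.contains y = true := by
    intro x hx hnx y hy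
    by_cases hc : Dv.contains x = true
    · by_cases hf : x ∈ fv
      · exact (Bv.con y).mpr (Or.inr ⟨x, hf, hy⟩)
      · exact (Bv.con y).mpr (Or.inl (h.i7v x hc hf y hy))
    · exact absurd ((mfv x).mpr ⟨((Bv.con x).mp hx).resolve_left hc, hc⟩) hnx
  have i7a' : ∀ x : Int, (fa.foldl (pvBfsVisit g ((t : Int) + 1)) (Da, [])).1.contains x = true
      → x ∉ (fa.foldl (pvBfsVisit g ((t : Int) + 1)) (Da, [])).2
      → ∀ y ∈ pvNbrs g x, (fa.foldl (pvBfsVisit g ((t : Int) + 1)) (Da, [])).1.contains y = true := by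
    intro x hx hnx y hy
    by_cases hc : Da.contains x = true
    · by_cases hf : x ∈ fa
      · exact (Ba.con y).mpr (Or.inr ⟨x, hf, hy⟩)
      · exact (Ba.con y).mpr (Or.inl (h.i7a x hc hf y hy))
    · exact absurd ((mfa x).mpr ⟨((Ba.con x).mp hx).resolve_left hc, hc⟩) hnx
  exact ⟨i1', i2', i3', i5v', i5a', i6', i7v', i7a',
    (Ba.con anti).mpr (Or.inl h.i9), Bv.knodup, Ba.knodup⟩

theorem pvInv_iter (g : PySem.Dict Int (PySem.Set Int)) (virus anti : Int) :
    ∀ t : Nat,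
      PvInv g anti t
        (pvCompIter g ([virus], [anti],
          PySem.Set.add (PySem.Set.add PySem.Set.empty virus) anti, 1) t).1
        (pvCompIter g ([virus], [anti],
          PySem.Set.add (PySem.Set.add PySem.Set.empty virus) anti, 1) t).2.1
        (pvCompIter g ([virus], [anti],
          PySem.Set.add (PySem.Set.add PySem.Set.empty virus) anti, 1) t).2.2.1
        (pvCompIter g ([virus], [anti],
          PySem.Set.add (PySem.Set.add PySem.Set.empty virus) anti, 1) t).2.2.2
        (pvBfsIter g virus t).1 (pvBfsIter g virus t).2
        (pvBfsIter g anti t).1 (pvBfsIter g anti t).2 := by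
  intro t
  induction t with
  | zero => exact pvInv_base g virus anti
  | succ t ih =>
    have hs := pvInv_step g anti t _ _ _ _ _ _ _ _ ih
    simp only [pvCompIter, pvCompStep, pvBfsIter]
    exact hs


-- ===== VERDICT (by name: the statement is the Claim_ definition above) =====
theorem getAntiNumber_spec : Claim_equal_getAntiNumber := by
  intro edges virus anti _
  show getAntiNumber edges virus anti = getAntiNumber_alt edges virus anti
  have hg : getAntiNumber edges virus anti
      = (pvCompIter (pvBuildGraph edges)
          ([virus], [anti], PySem.Set.add (PySem.Set.add PySem.Set.empty virus) anti, 1)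
          (2 * edges.length + 3)).2.2.2 := by
    rw [getAntiNumber_eq_comp]
    exact pvCompStop_eq_iter (pvBuildGraph edges) (2 * edges.length + 3) [virus] [anti] _ 1
  have hinv := pvInv_iter (pvBuildGraph edges) virus anti (2 * edges.length + 3)
  have halt : getAntiNumber_alt edges virus anti
      = 1 + (((pvBfsIter (pvBuildGraph edges) anti (2 * edges.length + 3)).1.items.countP
          (pvCondB (pvBfsIter (pvBuildGraph edges) virus (2 * edges.length + 3)).1 anti) : Int)) := by
    show ((pvBfs (pvBuildGraph edges) (2 * edges.length + 3) anti).items.foldl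
        (fun res nd => if nd.1 ≠ anti ∧ (¬ (pvBfs (pvBuildGraph edges) (2 * edges.length + 3) virus).contains nd.1 = true
            ∨ nd.2 < (pvBfs (pvBuildGraph edges) (2 * edges.length + 3) virus).getD nd.1 0) then res + 1 else res) 1) = _
    rw [pvBfs_eq_iter, pvBfs_eq_iter]
    rw [PySem.List.foldl_ite_add_one]
    rfl
  rw [hg, hinv.i6, halt]
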